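-- pv_equiv track=rewrite | github.com/KonstantinosAng/CodeWars | Python/[6 kyu] decipher student messages.py | decipher_message
-- ===== SOURCE A (Python) =====
-- import math
--
-- def decipher_message(message):
--   counter, ret = 0, ''
--   while len(ret) < len(message):
--     i = counter
--     while i < len(message):
--       ret += message[i]
--       i += int(math.sqrt(len(message)))
--     counter += 1
--   return ret
-- ===== SOURCE B (Python) =====
-- import math
--
-- def decipher_message(message):
--     n = len(message)
--     if n == 0:
--         return ''
--     s = int(math.sqrt(n))
--     buckets = [[] for _ in range(s)]
--     for i, ch in enumerate(message):
--         buckets[i % s].append(ch)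
--     return ''.join(''.join(b) for b in buckets)
-- ===== Notes on version B (the rewrite author's own statement) =====
-- stated objective: faster
-- what changed: Replaces the outer while-loop of s separate strided column scans with quadratic string concatenation by a single forward pass that distributes each character into residue bucket i % s and joins the buckets once.
import Mathlib
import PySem

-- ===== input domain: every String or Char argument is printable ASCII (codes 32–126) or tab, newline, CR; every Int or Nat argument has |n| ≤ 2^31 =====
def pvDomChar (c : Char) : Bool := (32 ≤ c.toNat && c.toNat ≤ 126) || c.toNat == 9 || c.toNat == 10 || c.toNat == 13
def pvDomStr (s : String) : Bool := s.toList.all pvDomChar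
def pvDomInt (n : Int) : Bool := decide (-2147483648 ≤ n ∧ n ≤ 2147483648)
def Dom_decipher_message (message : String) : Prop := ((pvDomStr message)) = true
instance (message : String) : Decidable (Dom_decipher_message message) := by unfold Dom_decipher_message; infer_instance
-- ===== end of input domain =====

-- B rewrites A's sqrt(n) strided column scans (with repeated string concatenation) as ONE forward
-- pass distributing characters into residue buckets (objective: faster, measured;
-- identical results, proved below).
-- `int(math.sqrt(n))` is ported as Nat.sqrt n (exact for every string length in the stated domain).

-- ===== PORT A =====
-- inner while-loop: i starts at `counter`, appends message[i], steps by s = int(sqrt(len(message))).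
-- `Nat.max s 1` is a termination guard only: the recursive call happens only when i < l.length, and
-- the single call site passes s = Nat.sqrt l.length ≥ 1 there, so Nat.max s 1 = s.
def innerA (l : List Char) (s i : Nat) : List Char :=
  if h : i < l.length then l[i] :: innerA l s (i + Nat.max s 1) else []
termination_by l.length - i
decreasing_by
  have h1 : 1 ≤ Nat.max s 1 := Nat.le_max_right s 1
  omega

-- outer while-loop: `while len(ret) < len(message)`; the fuel is a guard making the loop total
-- (fuel = l.length + 1 bounds the iteration count; enough, as proved below).
def outerA (l : List Char) (s : Nat) : Nat → Nat → List Char → List Char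
  | 0, _, ret => ret
  | fuel + 1, counter, ret =>
    if ret.length < l.length then
      outerA l s fuel (counter + 1) (ret ++ innerA l s counter)
    else ret

def decipher_message (message : String) : String :=
  let l := message.toList
  String.ofList (outerA l (Nat.sqrt l.length) (l.length + 1) 0 [])

-- ===== PORT B =====
def decipher_message_alt (message : String) : String :=
  let l := message.toList
  let n := l.length
  if n = 0 then ""
  else
    let s := Nat.sqrt n
    let buckets : List (List Char) := (List.range s).map (fun _ => ([] : List Char))
    let buckets :=
      (PySem.List.enumerate l).foldl
        (fun bs p => bs.modify (PySem.Int.mod p.1 (s : Int)).toNat (fun b => b ++ [p.2])) buckets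
    String.ofList buckets.flatten

-- ===== PRECONDITION & SPEC =====
def Spec_decipher_message (message : String) (out : String) : Prop := out = decipher_message_alt message
instance (message : String) (out : String) : Decidable (Spec_decipher_message message out) := by unfold Spec_decipher_message; infer_instance

-- ===== CLAIM (what is proved, stated in full; the proofs are below) =====
def Claim_equal_decipher_message : Prop := ∀ (message : String), Dom_decipher_message message → Spec_decipher_message message (decipher_message message)

-- ===== LEMMAS AND PROOFS =====

-- the index set read by the inner loop started at i: indices j ≥ i with j ≡ i (mod s)
def stridedP (s i j : Nat) : Bool := decide (i ≤ j ∧ (j - i) % s = 0)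

theorem filter_strided_nil (s i m : Nat) (h : m ≤ i) :
    (List.range m).filter (stridedP s i) = [] := by
  apply List.filter_eq_nil_iff.mpr
  intro j hj
  simp only [List.mem_range] at hj
  simp only [stridedP, decide_eq_true_eq]
  rintro ⟨h1, -⟩
  omega

theorem stridedP_shift (s i n : Nat) (hs : 1 ≤ s) (hin : i < n) :
    stridedP s i n = stridedP s (i + s) n := by
  simp only [stridedP, decide_eq_decide]
  constructor
  · rintro ⟨hle, hmod⟩
    obtain ⟨k, hk⟩ := Nat.dvd_of_mod_eq_zero hmod
    have hk1 : k = (k - 1) + 1 := by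
      rcases Nat.eq_zero_or_pos k with h0 | h0
      · subst h0; simp at hk; omega
      · omega
    rw [hk1, Nat.mul_succ] at hk
    refine ⟨by omega, ?_⟩
    have h2 : n - (i + s) = s * (k - 1) := by omega
    rw [h2]
    exact Nat.mul_mod_right s (k - 1)
  · rintro ⟨hle, hmod⟩
    obtain ⟨k, hk⟩ := Nat.dvd_of_mod_eq_zero hmod
    refine ⟨by omega, ?_⟩
    have h2 : n - i = s * (k + 1) := by rw [Nat.mul_succ]; omega
    rw [h2]
    exact Nat.mul_mod_right s (k + 1)

theorem filter_strided_step (s i : Nat) (hs : 1 ≤ s) : ∀ n : Nat,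
    (List.range n).filter (stridedP s i) =
      if i < n then i :: (List.range n).filter (stridedP s (i + s)) else [] := by
  intro n
  induction n with
  | zero => simp
  | succ n ih =>
    rw [List.range_succ, List.filter_append, List.filter_append, ih,
        List.filter_singleton, List.filter_singleton]
    rcases lt_trichotomy i n with h1 | h1 | h1
    · have h2 : i < n + 1 := by omega
      rw [stridedP_shift s i n hs h1]
      simp only [h1, if_pos, h2, List.cons_append]
    · subst h1
      have hself : stridedP s i i = true := by
        simp [stridedP]
      have hnext : stridedP s (i + s) i = false := by
        simp only [stridedP, decide_eq_false_iff_not]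
        rintro ⟨h, -⟩
        omega
      have h2 : ¬ i < i := by omega
      have h3 : i < i + 1 := by omega
      rw [filter_strided_nil s (i + s) i (by omega)]
      simp [hself, hnext, h3]
    · have h2 : ¬ i < n := by omega
      have h3 : ¬ i < n + 1 := by omega
      have hfail : stridedP s i n = false := by
        simp only [stridedP, decide_eq_false_iff_not]
        rintro ⟨h, -⟩
        omega
      simp [h2, h3, hfail]

-- the inner loop reads exactly the strided indices, in increasing order
theorem innerA_eq (l : List Char) (s : Nat) (hs : 1 ≤ s) (i : Nat) :
    innerA l s i = ((List.range l.length).filter (stridedP s i)).map (fun j => l.getD j ' ') := by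
  rw [innerA, filter_strided_step s i hs l.length]
  by_cases h : i < l.length
  · simp only [h, dif_pos, if_pos, List.map_cons]
    have hmax : i + Nat.max s 1 = i + s := by
      have hm : Nat.max s 1 = s := Nat.max_eq_left hs
      omega
    rw [hmax, innerA_eq l s hs (i + s)]
    rw [List.getD_eq_getElem l ' ' h]
  · simp [h]
termination_by l.length - i
decreasing_by omega

-- counting lemma driving the outer loop
theorem countP_mod_split (s k : Nat) : ∀ L : List Nat,
    L.countP (fun x => decide (x % s < k + 1)) =
      L.countP (fun x => decide (x % s < k)) + L.countP (fun x => decide (x % s = k)) := by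
  intro L
  induction L with
  | nil => simp
  | cons a L ih =>
    simp only [List.countP_cons, ih]
    by_cases h1 : a % s < k
    · have h2 : a % s < k + 1 := by omega
      have h3 : ¬ a % s = k := by omega
      simp [h1, h2, h3]
      omega
    · by_cases h4 : a % s = k
      · have h2 : a % s < k + 1 := by omega
        simp [h1, h2, h4]
        omega
      · have h2 : ¬ a % s < k + 1 := by omega
        simp [h1, h2, h4]

-- residue-class filter equals the strided filter, for a residue below s
theorem filter_mod_eq_strided (l : List Char) (s c : Nat) (hs : 1 ≤ s) (hc : c < s) :
    (List.range l.length).filter (fun k => decide (k % s = c)) =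
      (List.range l.length).filter (stridedP s c) := by
  apply List.filter_congr
  intro k _
  simp only [stridedP, decide_eq_decide]
  constructor
  · intro h
    have hle : c ≤ k := by
      have := Nat.mod_le k s
      omega
    refine ⟨hle, ?_⟩
    have hdm := Nat.div_add_mod k s
    have h2 : k - c = s * (k / s) := by omega
    rw [h2]
    exact Nat.mul_mod_right s (k / s)
  · rintro ⟨hle, hmod⟩
    obtain ⟨t, ht⟩ := Nat.dvd_of_mod_eq_zero hmod
    have hk : k = s * t + c := by omega
    rw [hk, Nat.mul_add_mod]
    exact Nat.mod_eq_of_lt hc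

-- characterisation of the bucket-distributing fold of port B
theorem bucket_fold_length (l : List Char) (s : Nat) :
    ∀ (m : Nat) (bs : List (List Char)),
      ((List.range m).foldl (fun bs k => bs.modify (k % s) (fun b => b ++ [l.getD k ' '])) bs).length
        = bs.length := by
  intro m
  induction m with
  | zero => intro bs; simp
  | succ m ih =>
    intro bs
    rw [List.range_succ, List.foldl_append]
    simp only [List.foldl_cons, List.foldl_nil, List.length_modify]
    exact ih bs

theorem bucket_fold_getElem (l : List Char) (s : Nat) :
    ∀ (m : Nat) (bs : List (List Char)) (j : Nat), j < bs.length →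
      ((List.range m).foldl (fun bs k => bs.modify (k % s) (fun b => b ++ [l.getD k ' '])) bs)[j]?
        = some (bs[j]! ++ (((List.range m).filter (fun k => decide (k % s = j))).map (fun k => l.getD k ' '))) := by
  intro m
  induction m with
  | zero =>
    intro bs j hj
    simp [List.getElem!_eq_getElem?_getD, List.getElem?_eq_getElem hj]
  | succ m ih =>
    intro bs j hj
    rw [List.range_succ, List.foldl_append, List.filter_append]
    simp only [List.foldl_cons, List.foldl_nil]
    rw [List.getElem?_modify, ih bs j hj]
    rw [List.filter_singleton]
    by_cases hcase : m % s = j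
    · simp [hcase]
    · simp [hcase]

-- the outer loop, unrolled: pass k appends column k; it stops exactly after pass s - 1
theorem outerA_eq (l : List Char) (s : Nat) (hs : 1 ≤ s) (hsn : s ≤ l.length) :
    ∀ (fuel k : Nat) (ret : List Char), k ≤ s → s - k ≤ fuel →
      ret.length = (List.range l.length).countP (fun x => decide (x % s < k)) →
      outerA l s fuel k ret = ret ++ ((List.range' k (s - k)).map (fun c => innerA l s c)).flatten := by
  intro fuel
  induction fuel with
  | zero =>
    intro k ret hk hfuel hlen
    have hks : k = s := by omega
    subst hks
    simp [outerA]
  | succ fuel ih =>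
    intro k ret hk hfuel hlen
    by_cases hks : k = s
    · have hall : (List.range l.length).countP (fun x => decide (x % s < k)) = (List.range l.length).length :=
        List.countP_eq_length.mpr (by
          intro a _
          simp only [decide_eq_true_eq]
          have := Nat.mod_lt a (show 0 < s by omega)
          omega)
      rw [List.length_range] at hall
      rw [outerA]
      have hstop : ¬ ret.length < l.length := by omega
      have hsk0 : s - k = 0 := by omega
      simp [hstop, hsk0]
    · have hk' : k < s := by omega
      have hklen : k < l.length := by omega
      have hret_lt : ret.length < l.length := by
        rw [hlen]
        have hle : (List.range l.length).countP (fun x => decide (x % s < k)) ≤ (List.range l.length).length :=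
          List.countP_le_length
        rw [List.length_range] at hle
        rcases Nat.lt_or_ge ((List.range l.length).countP (fun x => decide (x % s < k))) l.length with h | h
        · exact h
        · exfalso
          have heq : (List.range l.length).countP (fun x => decide (x % s < k)) = (List.range l.length).length := by
            rw [List.length_range]; omega
          have hallp := List.countP_eq_length.mp heq
          have hkmem : k ∈ List.range l.length := List.mem_range.mpr hklen
          have hck := hallp k hkmem
          simp only [decide_eq_true_eq] at hck
          have : k % s = k := Nat.mod_eq_of_lt hk'
          omega
      rw [outerA]
      simp only [hret_lt, if_pos]
      have hlen' : (ret ++ innerA l s k).length =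
          (List.range l.length).countP (fun x => decide (x % s < k + 1)) := by
        rw [List.length_append, hlen, countP_mod_split s k (List.range l.length)]
        congr 1
        rw [innerA_eq l s hs k, List.length_map, ← filter_mod_eq_strided l s k hs hk',
            List.countP_eq_length_filter]
      rw [ih (k + 1) (ret ++ innerA l s k) (by omega) (by omega) hlen']
      have hrange : List.range' k (s - k) = k :: List.range' (k + 1) (s - k - 1) := by
        have hsk : s - k = (s - k - 1) + 1 := by omega
        rw [hsk, List.range'_succ]
        norm_num
      rw [hrange]
      have hsk1 : s - (k + 1) = s - k - 1 := by omega
      rw [hsk1]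
      simp [List.append_assoc]

-- port B's fold, rewritten over Nat indices
theorem enumerate_fold_eq (l : List Char) (s : Nat) (bs : List (List Char)) :
    (PySem.List.enumerate l).foldl
        (fun bs p => bs.modify (PySem.Int.mod p.1 (s : Int)).toNat (fun b => b ++ [p.2])) bs
      = (List.range l.length).foldl
        (fun bs k => bs.modify (k % s) (fun b => b ++ [l.getD k ' '])) bs := by
  rw [PySem.List.enumerate_eq_map_pyRange l ' ', List.foldl_map]
  have hr : PySem.List.pyRange 0 (PySem.List.len l) 1 = (List.range l.length).map Int.ofNat := by
    rw [PySem.List.pyRange_one]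
    have h1 : ((PySem.List.len l) - 0).toNat = l.length := by
      rw [PySem.List.len_eq]
      omega
    rw [h1]
    apply List.map_congr_left
    intro k _
    rw [Int.ofNat_eq_natCast, zero_add]
  rw [hr, List.foldl_map]
  apply PySem.List.foldl_congr_mem
  intro acc k _
  simp [Int.ofNat_eq_natCast]
  rw [← Int.natCast_mod, Int.toNat_natCast]

-- ===== VERDICT (by name: the statement is the Claim_ definition above) =====
theorem decipher_message_spec : Claim_equal_decipher_message := by
  intro message _
  unfold Spec_decipher_message decipher_message decipher_message_alt
  by_cases hn : message.toList.length = 0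
  · have hl0 : message.toList = [] := List.length_eq_zero_iff.mp hn
    simp [hl0, outerA]
  · have hn1 : 1 ≤ message.toList.length := by omega
    have hs : 1 ≤ Nat.sqrt message.toList.length := Nat.sqrt_pos.mpr (by omega)
    have hsn : Nat.sqrt message.toList.length ≤ message.toList.length := Nat.sqrt_le_self _
    set l := message.toList with hldef
    set s := Nat.sqrt l.length with hsdef
    have hA : outerA l s (l.length + 1) 0 [] =
        ((List.range' 0 s).map (fun c => innerA l s c)).flatten := by
      have h0 : (([] : List Char)).length = (List.range l.length).countP (fun x => decide (x % s < 0)) := by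
        simp
      have := outerA_eq l s hs hsn (l.length + 1) 0 [] (by omega) (by omega) h0
      simpa using this
    have hB : ((PySem.List.enumerate l).foldl
        (fun bs p => bs.modify (PySem.Int.mod p.1 (s : Int)).toNat (fun b => b ++ [p.2]))
        ((List.range s).map (fun _ => ([] : List Char))))
        = (List.range s).map (fun c => innerA l s c) := by
      rw [enumerate_fold_eq]
      apply List.ext_getElem
      · rw [bucket_fold_length l s]
        simp
      · intro j h1 h2
        have hjs : j < s := by simpa using h2
        have hjbs : j < ((List.range s).map (fun _ => ([] : List Char))).length := by
          simpa using hjs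
        have hget := bucket_fold_getElem l s l.length ((List.range s).map (fun _ => ([] : List Char))) j hjbs
        rw [List.getElem?_eq_getElem h1] at hget
        simp only [Option.some.injEq] at hget
        rw [hget]
        have hempty : ((List.range s).map (fun _ => ([] : List Char)))[j]! = ([] : List Char) := by
          simp [hjs]
        rw [hempty, List.nil_append, List.getElem_map, List.getElem_range]
        rw [filter_mod_eq_strided l s j hs hjs, ← innerA_eq l s hs j]
    simp only [hn, if_neg, not_false_iff]
    rw [hA, hB, ← List.range_eq_range']
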